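-- pv_equiv track=rewrite | github.com/RoyZry98/RepCaM-Pytorch | src/utility.py | make_trainChunk
-- ===== SOURCE A (Python) =====
-- def make_trainChunk(num, length, segnum):
--     chunk = int(int(length)//int(segnum))
--     t_num = [[] for i in range(segnum)]
--     for i in range(segnum):
--         s = i*chunk + 1
--         e = (i+1)*chunk
--         t_num[i] = [j for j in range(len(num)) if s<=int(num[j])<=e]
--     return t_num
-- ===== SOURCE B (Python) =====
-- def make_trainChunk(num, length, segnum):
--     chunk = int(length) // int(segnum)
--     buckets = [[] for _ in range(segnum)]
--     if chunk > 0: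
--         top = segnum * chunk
--         for j in range(len(num)):
--             v = int(num[j])
--             if 1 <= v <= top:
--                 buckets[(v - 1) // chunk].append(j)
--     return buckets
-- ===== Notes on version B (the rewrite author's own statement) =====
-- stated objective: faster
-- what changed: Replaces A's segnum full scans of num (one filter pass per segment) by a single pass over num that computes each value's segment directly as (v-1)//chunk, so the per-segment inner scan disappears.
import Mathlib
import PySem

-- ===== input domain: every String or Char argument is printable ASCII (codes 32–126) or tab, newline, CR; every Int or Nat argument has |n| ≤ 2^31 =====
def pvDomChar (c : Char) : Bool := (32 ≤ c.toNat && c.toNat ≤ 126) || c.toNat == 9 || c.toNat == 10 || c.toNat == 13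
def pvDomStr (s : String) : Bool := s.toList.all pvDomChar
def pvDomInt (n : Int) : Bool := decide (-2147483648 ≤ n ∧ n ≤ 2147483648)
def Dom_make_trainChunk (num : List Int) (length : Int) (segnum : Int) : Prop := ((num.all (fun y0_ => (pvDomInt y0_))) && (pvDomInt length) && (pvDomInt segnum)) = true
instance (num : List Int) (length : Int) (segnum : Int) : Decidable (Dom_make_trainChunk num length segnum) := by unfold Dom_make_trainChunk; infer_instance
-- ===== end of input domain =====

-- B replaces A's per-segment full scans of num by ONE pass over num that computes each
-- value's segment index directly as (v-1)//chunk (objective: faster).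

-- ===== PORT A =====
def make_trainChunk (num : List Int) (length : Int) (segnum : Int) : List (List Int) :=
  let chunk := PySem.Int.floordiv length segnum
  let t0 : List (List Int) := (PySem.List.pyRange 0 segnum 1).map (fun _ => ([] : List Int))
  (PySem.List.pyRange 0 segnum 1).foldl (fun t i =>
    let s := i * chunk + 1
    let e := (i + 1) * chunk
    PySem.List.pySetD t i ((PySem.List.pyRange 0 (num.length : Int) 1).filter
      (fun j => decide (s ≤ PySem.List.pyGetD num j 0 ∧ PySem.List.pyGetD num j 0 ≤ e)))) t0

-- ===== PORT B =====
def make_trainChunk_alt (num : List Int) (length : Int) (segnum : Int) : List (List Int) :=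
  let chunk := PySem.Int.floordiv length segnum
  let buckets : List (List Int) := (PySem.List.pyRange 0 segnum 1).map (fun _ => ([] : List Int))
  if 0 < chunk then
    let top := segnum * chunk
    (PySem.List.pyRange 0 (num.length : Int) 1).foldl (fun bs j =>
      let v := PySem.List.pyGetD num j 0
      if 1 ≤ v ∧ v ≤ top then
        PySem.List.pySetD bs (PySem.Int.floordiv (v - 1) chunk)
          (PySem.List.pyGetD bs (PySem.Int.floordiv (v - 1) chunk) [] ++ [j])
      else bs) buckets
  else buckets

-- ===== PRECONDITION & SPEC =====
-- Pre_ excludes exactly segnum = 0, where Python's '//' raises ZeroDivisionError (in A and in B alike).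
def Pre_make_trainChunk (num : List Int) (length : Int) (segnum : Int) : Prop := segnum ≠ 0
instance (num : List Int) (length : Int) (segnum : Int) : Decidable (Pre_make_trainChunk num length segnum) := by unfold Pre_make_trainChunk; infer_instance
def pvWitness_make_trainChunk : List Int × Int × Int := ([1, 2, 5], 4, 2)

def Spec_make_trainChunk (num : List Int) (length : Int) (segnum : Int) (out : List (List Int)) : Prop := out = make_trainChunk_alt num length segnum
instance (num : List Int) (length : Int) (segnum : Int) (out : List (List Int)) : Decidable (Spec_make_trainChunk num length segnum out) := by unfold Spec_make_trainChunk; infer_instance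

-- ===== CLAIM (what is proved, stated in full; the proofs are below) =====
def Claim_equal_make_trainChunk : Prop := ∀ (num : List Int) (length : Int) (segnum : Int), Dom_make_trainChunk num length segnum → Pre_make_trainChunk num length segnum → Spec_make_trainChunk num length segnum (make_trainChunk num length segnum)

-- ===== LEMMAS AND PROOFS =====

lemma take_set_succ (t : List (List Int)) (k : Nat) (x : List Int) (h : k < t.length) :
    (t.set k x).take (k+1) = t.take k ++ [x] := by
  rw [List.take_add_one]
  rw [List.take_set, List.getElem?_eq_getElem (by simpa using h : k < (t.set k x).length)]
  rw [List.set_eq_of_length_le (by simp)]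
  simp

-- A's loop 'for i: t[i] = f i' over a list of the right length is a map.
lemma foldA_gen (f : Int → List Int) :
    ∀ (a m : Int), 0 ≤ a → ∀ (t : List (List Int)), t.length = m.toNat →
    (PySem.List.pyRange a m 1).foldl (fun t i => PySem.List.pySetD t i (f i)) t
      = t.take a.toNat ++ (PySem.List.pyRange a m 1).map f := by
  intro a m ha t ht
  by_cases hm : m ≤ a
  · rw [PySem.List.pyRange_one_eq_nil hm]
    rw [List.take_of_length_le (by omega)]
    simp
  · rw [not_le] at hm
    rw [PySem.List.pyRange_one_cons hm]
    simp only [List.foldl_cons, List.map_cons]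
    rw [PySem.List.pySetD_of_nonneg t (f a) ha]
    have hlt : a.toNat < t.length := by omega
    rw [foldA_gen f (a+1) m (by omega) _ (by simp [ht])]
    have : (a+1).toNat = a.toNat + 1 := by omega
    rw [this, take_set_succ t a.toNat (f a) hlt]
    simp
termination_by a m _ _ _ => (m - a).toNat
decreasing_by omega

-- B's single pass, characterised bucket by bucket.
lemma foldB_gen (num : List Int) (chunk top : Int) (hc : 0 < chunk) :
    ∀ (R : List Int) (bs : List (List Int)) (k : Nat),
    (R.foldl (fun bs j =>
        let v := PySem.List.pyGetD num j 0
        if 1 ≤ v ∧ v ≤ top then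
          PySem.List.pySetD bs (PySem.Int.floordiv (v - 1) chunk)
            (PySem.List.pyGetD bs (PySem.Int.floordiv (v - 1) chunk) [] ++ [j])
        else bs) bs)[k]?
      = (bs[k]?).map (fun b => b ++ R.filter (fun j =>
          decide (1 ≤ PySem.List.pyGetD num j 0 ∧ PySem.List.pyGetD num j 0 ≤ top ∧
            PySem.Int.floordiv (PySem.List.pyGetD num j 0 - 1) chunk = (k : Int)))) := by
  intro R
  induction R with
  | nil => intro bs k; cases h : bs[k]? <;> simp [h]
  | cons j R ih =>
    intro bs k
    simp only [List.foldl_cons, List.filter_cons]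
    by_cases h1 : 1 ≤ PySem.List.pyGetD num j 0 ∧ PySem.List.pyGetD num j 0 ≤ top
    · have hqnn : 0 ≤ PySem.Int.floordiv (PySem.List.pyGetD num j 0 - 1) chunk := by
        rw [PySem.Int.le_floordiv_iff_mul_le hc]
        omega
      rw [if_pos h1]
      rw [ih, PySem.List.pySetD_of_nonneg bs _ hqnn]
      by_cases h2 : PySem.Int.floordiv (PySem.List.pyGetD num j 0 - 1) chunk = (k : Int)
      · have hs : (PySem.Int.floordiv (PySem.List.pyGetD num j 0 - 1) chunk).toNat = k := by
          omega
        rw [hs]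
        by_cases hk : k < bs.length
        · rw [List.getElem?_set_self', List.getElem?_eq_getElem hk]
          rw [PySem.List.pyGetD_eq_getElem bs [] hqnn (by omega)]
          simp [h1, h2, List.append_assoc]
        · rw [List.getElem?_eq_none (by simpa using (by omega : bs.length ≤ k)),
              List.getElem?_eq_none (by omega)]
          simp
      · rw [List.getElem?_set_ne (by omega)]
        simp [h1, h2]
    · rw [if_neg h1]
      rw [ih]
      have hnot : ¬(1 ≤ PySem.List.pyGetD num j 0 ∧ PySem.List.pyGetD num j 0 ≤ top ∧
          PySem.Int.floordiv (PySem.List.pyGetD num j 0 - 1) chunk = (k : Int)) :=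
        fun h => h1 ⟨h.1, h.2.1⟩
      simp [hnot]

-- A's per-segment range test and B's computed segment index select the same values.
lemma cond_iff (segnum chunk v : Int) (k : Nat) (hk : (k : Int) < segnum) (hc : 0 < chunk) :
    ((k : Int) * chunk + 1 ≤ v ∧ v ≤ ((k : Int) + 1) * chunk) ↔
      (1 ≤ v ∧ v ≤ segnum * chunk ∧ PySem.Int.floordiv (v - 1) chunk = (k : Int)) := by
  rw [PySem.Int.floordiv_eq_iff_of_pos hc]
  have hexp : ((k : Int) + 1) * chunk = (k : Int) * chunk + chunk := by ring
  have hknn : (0:Int) ≤ (k:Int) * chunk := mul_nonneg (by positivity) hc.le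
  have hseg : ((k : Int) + 1) * chunk ≤ segnum * chunk :=
    mul_le_mul_of_nonneg_right (by omega) hc.le
  constructor
  · rintro ⟨h1, h2⟩
    exact ⟨by linarith, by linarith, by linarith, by linarith⟩
  · rintro ⟨h1, h2, h3, h4⟩
    exact ⟨by linarith, by linarith⟩

-- A in map/filter form.
lemma A_shape (num : List Int) (length segnum : Int) :
    make_trainChunk num length segnum
      = (PySem.List.pyRange 0 segnum 1).map (fun i =>
          (PySem.List.pyRange 0 (num.length : Int) 1).filter
            (fun j => decide (i * PySem.Int.floordiv length segnum + 1 ≤ PySem.List.pyGetD num j 0 ∧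
              PySem.List.pyGetD num j 0 ≤ (i + 1) * PySem.Int.floordiv length segnum))) := by
  unfold make_trainChunk
  rw [foldA_gen _ 0 segnum (le_refl 0) _ (by simp [PySem.List.length_pyRange_one])]
  simp

-- ===== VERDICT (by name: the statement is the Claim_ definition above) =====
theorem make_trainChunk_spec : Claim_equal_make_trainChunk := by
  intro num length segnum _ _
  unfold Spec_make_trainChunk
  rw [A_shape]
  unfold make_trainChunk_alt
  simp only []
  set chunk := PySem.Int.floordiv length segnum with hchunk
  by_cases hc : 0 < chunk
  · rw [if_pos hc]
    apply List.ext_getElem?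
    intro k
    rw [foldB_gen num chunk (segnum * chunk) hc]
    rw [List.getElem?_map, List.getElem?_map]
    rcases h : (PySem.List.pyRange 0 segnum 1)[k]? with _ | i
    · simp
    · have hmem : i ∈ PySem.List.pyRange 0 segnum 1 := List.mem_of_getElem? h
      have hi : 0 ≤ i ∧ i < segnum := (PySem.List.mem_pyRange_one).mp hmem
      have hik : i = (k : Int) := by
        rw [PySem.List.getElem?_pyRange_one] at h
        split at h
        · have := Option.some.inj h; omega
        · cases h
      simp only [Option.map_some]
      congr 1
      apply List.filter_congr
      intro j _
      have := cond_iff segnum chunk (PySem.List.pyGetD num j 0) k (by omega) hc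
      simp only [hik]
      rw [decide_eq_decide]
      exact this
  · rw [if_neg hc]
    apply List.map_congr_left
    intro i hmem
    have hi : 0 ≤ i ∧ i < segnum := (PySem.List.mem_pyRange_one).mp hmem
    apply List.filter_eq_nil_iff.mpr
    intro j _
    have hexp : (i + 1) * chunk = i * chunk + chunk := by ring
    simp only [decide_eq_true_eq, not_and]
    intro h1 h2
    rw [not_lt] at hc
    linarith
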